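-- pv_equiv track=rewrite | github.com/genometechlab/asmTools | asmToRefViz.py | parse_cigar_for_length
-- ===== SOURCE A (Python) =====
-- def parse_cigar_for_length(cigar: str) -> int:
--     count:str  = ""
--     code: str = ""
--     total_dist: int = 0
--     c: str
--
--     for c in cigar:
--         if c.isalpha():
--             if c == 'M' or c == 'D':
--                 total_dist += int(count)
--             count = ""
--         else:
--             count = count + c
--     return total_dist
-- ===== SOURCE B (Python) =====
-- import re
--
-- def parse_cigar_for_length(cigar: str) -> int:
--     pairs = re.findall(r'([^A-Za-z]*)([A-Za-z])', cigar)
--     return sum(int(n) for n, op in pairs if op == 'M' or op == 'D')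
-- ===== Notes on version B (the rewrite author's own statement) =====
-- stated objective: idiomatic
-- what changed: B replaces A's character-by-character loop with a mutable count accumulator by regex tokenization into (run, op) pairs followed by a filtered sum comprehension.
import Mathlib
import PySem

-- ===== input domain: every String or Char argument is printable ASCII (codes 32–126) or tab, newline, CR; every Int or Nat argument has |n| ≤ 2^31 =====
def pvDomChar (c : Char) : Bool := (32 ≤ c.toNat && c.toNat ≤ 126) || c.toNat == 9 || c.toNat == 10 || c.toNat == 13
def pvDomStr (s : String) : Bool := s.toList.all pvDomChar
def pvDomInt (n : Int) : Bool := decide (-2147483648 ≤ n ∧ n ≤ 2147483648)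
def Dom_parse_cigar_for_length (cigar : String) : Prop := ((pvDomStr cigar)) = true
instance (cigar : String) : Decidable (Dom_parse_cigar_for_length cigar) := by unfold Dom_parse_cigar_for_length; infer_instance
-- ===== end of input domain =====

-- B tokenizes the CIGAR with a regex into (count-run, op) pairs and sums the M/D runs;
-- A scans char by char with a string accumulator.  Equal wherever Python A returns (Pre_).

-- ===== PORT A =====
-- int(count) is ported as (ofStr? …).getD 0; Pre_ excludes the inputs where int() raises,
-- so on Pre_ the default is never taken.
def pcflLoop : List Char → List Char → Int → Int
  | [], _, total => total
  | c :: cs, count, total =>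
    if PySem.Chars.isalpha c then
      pcflLoop cs []
        (if c = 'M' ∨ c = 'D' then total + (PySem.Int.ofStr? (String.mk count)).getD 0 else total)
    else
      pcflLoop cs (count ++ [c]) total

def parse_cigar_for_length (cigar : String) : Int :=
  pcflLoop cigar.toList [] 0

-- ===== PORT B =====
-- Hand port of re.findall(r'([^A-Za-z]*)([A-Za-z])', cigar): at each position, greedily
-- take the maximal non-letter run; if a letter follows, emit the (run, letter) pair and
-- continue after it; a trailing run with no letter matches nothing.  Exact for this
-- pattern on all inputs (the pattern cannot match the empty string).  The Nat fuel
-- (initialised to the string length, which bounds the number of matches) only makes the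
-- scan structurally recursive; it is never exhausted.
def pcflFindall : Nat → List Char → List (List Char × Char)
  | 0, _ => []
  | fuel + 1, cs =>
    match cs.dropWhile (fun c => !PySem.Chars.isalpha c) with
    | [] => []
    | c :: rest => (cs.takeWhile (fun c => !PySem.Chars.isalpha c), c) :: pcflFindall fuel rest

def parse_cigar_for_length_alt (cigar : String) : Int :=
  ((pcflFindall cigar.toList.length cigar.toList).filter
      (fun p => p.2 == 'M' || p.2 == 'D')).foldl
    (fun s p => s + (PySem.Int.ofStr? (String.mk p.1)).getD 0) 0

-- ===== PRECONDITION & SPEC =====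
-- Pre_: exactly the inputs where Python A returns: for every 'M'/'D' in the string, the
-- maximal run of non-letter characters immediately before it parses as a Python int
-- (otherwise A's int(count) raises ValueError; B's int(n) raises there too).
def Pre_parse_cigar_for_length (cigar : String) : Prop :=
  ∀ j, (h : j < cigar.toList.length) →
    (cigar.toList[j] = 'M' ∨ cigar.toList[j] = 'D') →
    (PySem.Int.ofStr? (String.mk
      (((cigar.toList.take j).reverse.takeWhile (fun c => !PySem.Chars.isalpha c)).reverse))).isSome = true
instance (cigar : String) : Decidable (Pre_parse_cigar_for_length cigar) := by
  unfold Pre_parse_cigar_for_length; infer_instance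

def pvWitness_parse_cigar_for_length : String := "10M2I3D5S"

def Spec_parse_cigar_for_length (cigar : String) (out : Int) : Prop := out = parse_cigar_for_length_alt cigar
instance (cigar : String) (out : Int) : Decidable (Spec_parse_cigar_for_length cigar out) := by unfold Spec_parse_cigar_for_length; infer_instance

-- ===== CLAIM (what is proved, stated in full; the proofs are below) =====
def Claim_equal_parse_cigar_for_length : Prop := ∀ (cigar : String), Dom_parse_cigar_for_length cigar → Pre_parse_cigar_for_length cigar → Spec_parse_cigar_for_length cigar (parse_cigar_for_length cigar)

-- ===== LEMMAS AND PROOFS =====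

-- Tokenizer in A's traversal shape: current unfinished run is `count`.
def pcflTokF (count : List Char) : List Char → List (List Char × Char)
  | [] => []
  | c :: cs =>
    if PySem.Chars.isalpha c then (count, c) :: pcflTokF [] cs
    else pcflTokF (count ++ [c]) cs

def pcflVal (p : List Char × Char) : Int := (PySem.Int.ofStr? (String.mk p.1)).getD 0

def pcflSum (l : List (List Char × Char)) : Int :=
  (l.filter (fun p => p.2 == 'M' || p.2 == 'D')).foldl (fun s p => s + pcflVal p) 0

theorem pcfl_foldl_shift (l : List (List Char × Char)) (t : Int) :
    l.foldl (fun s p => s + pcflVal p) t = t + l.foldl (fun s p => s + pcflVal p) 0 := by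
  induction l generalizing t with
  | nil => simp
  | cons p l ih =>
    simp only [List.foldl_cons]
    rw [ih (t + pcflVal p), ih (0 + pcflVal p)]
    ring

theorem pcfl_dropWhile_append_all {p : Char → Bool} :
    ∀ (l r : List Char), (∀ c ∈ l, p c = true) → (l ++ r).dropWhile p = r.dropWhile p := by
  intro l r h
  induction l with
  | nil => simp
  | cons d l ih =>
    simp only [List.cons_append, List.dropWhile_cons, h d (by simp), if_true]
    exact ih (fun c hc => h c (by simp [hc]))

theorem pcfl_takeWhile_append_all {p : Char → Bool} :
    ∀ (l r : List Char), (∀ c ∈ l, p c = true) → (l ++ r).takeWhile p = l ++ r.takeWhile p := by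
  intro l r h
  induction l with
  | nil => simp
  | cons d l ih =>
    simp only [List.cons_append, List.takeWhile_cons, h d (by simp), if_true, List.cons.injEq,
      true_and]
    exact ih (fun c hc => h c (by simp [hc]))

theorem pcfl_findall_eq_tokF :
    ∀ (cs count : List Char) (fuel : Nat), (count ++ cs).length ≤ fuel →
      (∀ c ∈ count, PySem.Chars.isalpha c = false) →
      pcflFindall fuel (count ++ cs) = pcflTokF count cs := by
  intro cs
  induction cs with
  | nil =>
    intro count fuel hlen hcount
    cases fuel with
    | zero =>
      simp at hlen
      simp [pcflFindall, pcflTokF]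
    | succ f =>
      have hdrop : count.dropWhile (fun c => !PySem.Chars.isalpha c) = [] := by
        rw [List.dropWhile_eq_nil_iff]
        intro c hc
        simp [hcount c hc]
      simp [pcflFindall, hdrop, pcflTokF]
  | cons c cs ih =>
    intro count fuel hlen hcount
    cases fuel with
    | zero => simp at hlen
    | succ f =>
      have hall : ∀ x ∈ count, (fun c => !PySem.Chars.isalpha c) x = true := by
        intro x hx; simp [hcount x hx]
      by_cases hc : PySem.Chars.isalpha c = true
      · have hdrop : (count ++ c :: cs).dropWhile (fun c => !PySem.Chars.isalpha c) = c :: cs := by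
          rw [pcfl_dropWhile_append_all count (c :: cs) hall]
          simp [hc]
        have htake : (count ++ c :: cs).takeWhile (fun c => !PySem.Chars.isalpha c) = count := by
          rw [pcfl_takeWhile_append_all count (c :: cs) hall]
          simp [hc]
        have hrec : pcflFindall f cs = pcflTokF [] cs := by
          have hl : cs.length ≤ f := by
            simp only [List.length_append, List.length_cons] at hlen
            omega
          simpa using ih [] f (by simpa using hl) (by intro x hx; simp at hx)
        simp only [pcflFindall, hdrop, htake, hrec, pcflTokF, hc, if_true]
      · have hc' : PySem.Chars.isalpha c = false := by
          revert hc; cases PySem.Chars.isalpha c <;> simp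
        have heq : count ++ c :: cs = (count ++ [c]) ++ cs := by simp
        rw [heq, ih (count ++ [c]) (f + 1) (by simp only [List.length_append, List.length_cons, List.length_nil] at hlen ⊢; omega)
          (by intro x hx
              rcases (by simpa using hx : x ∈ count ∨ x = c) with h | h
              · exact hcount x h
              · simpa [h] using hc')]
        simp [pcflTokF, hc']

theorem pcfl_loop_eq_sum :
    ∀ (cs count : List Char) (t : Int), pcflLoop cs count t = t + pcflSum (pcflTokF count cs) := by
  intro cs
  induction cs with
  | nil => intro count t; simp [pcflLoop, pcflTokF, pcflSum]
  | cons c cs ih =>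
    intro count t
    by_cases hc : PySem.Chars.isalpha c = true
    · by_cases hmd : c = 'M' ∨ c = 'D'
      · have hb : (c == 'M' || c == 'D') = true := by
          rcases hmd with h | h <;> simp [h]
        simp only [pcflLoop, hc, if_true, hmd]
        rw [ih]
        simp only [pcflTokF, hc, if_true, pcflSum, List.filter_cons, hb, List.foldl_cons, zero_add]
        rw [pcfl_foldl_shift _ (pcflVal (count, c))]
        simp only [pcflVal]
        ring
      · have hb : (c == 'M' || c == 'D') = false := by
          simp only [Bool.or_eq_false_iff, beq_eq_false_iff_ne]
          exact ⟨fun h => hmd (Or.inl h), fun h => hmd (Or.inr h)⟩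
        simp only [pcflLoop, hc, if_true, hmd, if_false]
        rw [ih]
        simp [pcflTokF, hc, pcflSum, hb]
    · have hc' : PySem.Chars.isalpha c = false := by
        revert hc; cases PySem.Chars.isalpha c <;> simp
      simp only [pcflLoop, hc', Bool.false_eq_true, if_false]
      rw [ih]
      simp [pcflTokF, hc']

-- ===== VERDICT (by name: the statement is the Claim_ definition above) =====
theorem parse_cigar_for_length_spec : Claim_equal_parse_cigar_for_length := by
  unfold Claim_equal_parse_cigar_for_length
  intro cigar _ _
  unfold Spec_parse_cigar_for_length parse_cigar_for_length parse_cigar_for_length_alt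
  rw [pcfl_loop_eq_sum]
  have h := pcfl_findall_eq_tokF cigar.toList [] cigar.toList.length (by simp) (by intro x hx; simp at hx)
  simp only [List.nil_append] at h
  rw [h]
  simp [pcflSum, pcflVal]
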